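-- pv_equiv track=rewrite | github.com/Shakour-Data/AutoProjectManagement | src/autoprojectmanagement/main_modules/planning_estimation/dependency_manager.py | get_critical_path
-- ===== SOURCE A (Python) =====
-- from typing import Dict, List, Set, Any
--
-- def get_critical_path(task_durations: Dict[str, int]) -> List[str]:
--     """
--     Calculate critical path using topological sort and longest path algorithm.
--
--     Args:
--         task_durations: Dictionary mapping task IDs to durations
--
--     Returns:
--         List of task IDs in the critical path
--     """
--     # This is a simplified implementation
--     # In a real system, you'd use topological sort and dynamic programming
--
--     # For now, return tasks with the longest duration as a placeholder
--     critical_tasks = []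
--     max_duration = 0
--
--     for task_id, duration in task_durations.items():
--         if duration > max_duration:
--             max_duration = duration
--             critical_tasks = [task_id]
--         elif duration == max_duration:
--             critical_tasks.append(task_id)
--
--     return critical_tasks
-- ===== SOURCE B (Python) =====
-- def get_critical_path(task_durations):
--     """Two-pass: compute the (0-floored) maximum duration, then filter for it."""
--     max_duration = max([0, *task_durations.values()])
--     return [task_id for task_id, duration in task_durations.items()
--             if duration == max_duration]
-- ===== Notes on version B (the rewrite author's own statement) =====
-- stated objective: simpler
-- what changed: Replaces the fused running-max-with-tie-list loop by a two-pass find-max-then-filter: one max() expression (seeded with 0, matching A's starting max) and one comprehension.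
import Mathlib
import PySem

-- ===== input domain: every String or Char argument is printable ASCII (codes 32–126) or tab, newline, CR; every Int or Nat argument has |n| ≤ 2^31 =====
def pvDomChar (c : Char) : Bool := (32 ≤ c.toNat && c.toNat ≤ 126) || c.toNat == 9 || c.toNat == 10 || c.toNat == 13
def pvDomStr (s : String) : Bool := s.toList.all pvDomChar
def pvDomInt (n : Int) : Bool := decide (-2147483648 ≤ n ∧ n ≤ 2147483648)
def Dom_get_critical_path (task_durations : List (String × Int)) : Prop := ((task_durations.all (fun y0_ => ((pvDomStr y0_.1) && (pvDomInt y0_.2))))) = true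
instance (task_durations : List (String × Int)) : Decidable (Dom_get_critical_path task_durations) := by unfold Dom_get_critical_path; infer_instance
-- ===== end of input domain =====

-- ===== PORT A =====
-- A: single fused loop carrying (critical_tasks, max_duration), reset-on-new-max.
def goA_get_critical_path : List (String × Int) → List String → Int → List String
  | [], acc, _ => acc
  | (t, d) :: rest, acc, m =>
    if d > m then goA_get_critical_path rest [t] d
    else if d == m then goA_get_critical_path rest (acc ++ [t]) m
    else goA_get_critical_path rest acc m

def get_critical_path (task_durations : List (String × Int)) : List String :=
  goA_get_critical_path task_durations [] 0

-- ===== PORT B =====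
-- B (simpler, two passes): max over [0, *values], then a filtering comprehension.
def get_critical_path_alt (task_durations : List (String × Int)) : List String :=
  let max_duration : Int := (task_durations.map Prod.snd).foldl max 0
  (task_durations.filter (fun p => p.2 == max_duration)).map Prod.fst

-- ===== PRECONDITION & SPEC =====
def Spec_get_critical_path (task_durations : List (String × Int)) (out : List String) : Prop := out = get_critical_path_alt task_durations
instance (task_durations : List (String × Int)) (out : List String) : Decidable (Spec_get_critical_path task_durations out) := by unfold Spec_get_critical_path; infer_instance

-- ===== CLAIM (what is proved, stated in full; the proofs are below) =====
def Claim_equal_get_critical_path : Prop := ∀ (task_durations : List (String × Int)), Dom_get_critical_path task_durations → Spec_get_critical_path task_durations (get_critical_path task_durations)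

-- ===== LEMMAS AND PROOFS =====
def foldMax_get_critical_path (l : List (String × Int)) (m : Int) : Int :=
  l.foldl (fun a p => max a p.2) m

theorem le_foldMax (l : List (String × Int)) (m : Int) : m ≤ foldMax_get_critical_path l m := by
  induction l generalizing m with
  | nil => simp [foldMax_get_critical_path]
  | cons p rest ih =>
    calc m ≤ max m p.2 := le_max_left _ _
      _ ≤ _ := ih (max m p.2)

theorem foldMax_cons (p : String × Int) (l : List (String × Int)) (m : Int) :
    foldMax_get_critical_path (p :: l) m = foldMax_get_critical_path l (max m p.2) := rfl

theorem goA_characterization (l : List (String × Int)) (m : Int) (acc : List String) :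
    goA_get_critical_path l acc m =
      (if foldMax_get_critical_path l m = m then acc else []) ++
        (l.filter (fun p => p.2 == foldMax_get_critical_path l m)).map Prod.fst := by
  induction l generalizing m acc with
  | nil => simp [goA_get_critical_path, foldMax_get_critical_path]
  | cons p rest ih =>
    obtain ⟨t, d⟩ := p
    rw [foldMax_cons]
    simp only [goA_get_critical_path]
    rcases lt_trichotomy m d with h | h | h
    · -- d > m : reset
      rw [if_pos h]
      rw [ih]
      have hmax : max m d = d := max_eq_right h.le
      rw [hmax]
      have hge : d ≤ foldMax_get_critical_path rest d := le_foldMax rest d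
      have hne : foldMax_get_critical_path rest d ≠ m := by omega
      rw [if_neg hne]
      by_cases hF : foldMax_get_critical_path rest d = d
      · simp [List.filter, hF]
      · have : ((d : Int) == foldMax_get_critical_path rest d) = false := by
          simp only [beq_eq_false_iff_ne, ne_eq]; omega
        simp [List.filter, hF, this]
    · -- d = m : append
      subst h
      rw [if_neg (lt_irrefl m), if_pos (beq_self_eq_true m)]
      rw [ih]
      rw [max_self]
      by_cases hF : foldMax_get_critical_path rest m = m
      · simp [List.filter, hF]
      · have : ((m : Int) == foldMax_get_critical_path rest m) = false := by
          simp; exact fun h => hF h.symm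
        simp [List.filter, hF, this]
    · -- d < m : skip
      rw [if_neg (not_lt.mpr h.le)]
      have hne' : (d == m) = false := by simp only [beq_eq_false_iff_ne, ne_eq]; omega
      rw [hne']
      simp only [Bool.false_eq_true, if_false]
      rw [ih]
      have hmax : max m d = m := max_eq_left h.le
      rw [hmax]
      have hge : m ≤ foldMax_get_critical_path rest m := le_foldMax rest m
      have : ((d : Int) == foldMax_get_critical_path rest m) = false := by
        simp only [beq_eq_false_iff_ne, ne_eq]; omega
      simp [List.filter, this]

theorem foldMax_eq_map (l : List (String × Int)) (m : Int) :
    (l.map Prod.snd).foldl max m = foldMax_get_critical_path l m := by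
  induction l generalizing m with
  | nil => rfl
  | cons p rest ih => simpa [foldMax_get_critical_path, List.foldl] using ih (max m p.2)

-- ===== VERDICT (by name: the statement is the Claim_ definition above) =====
theorem get_critical_path_spec : Claim_equal_get_critical_path := by
  intro l _
  unfold Spec_get_critical_path get_critical_path get_critical_path_alt
  rw [goA_characterization, foldMax_eq_map]
  simp
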